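-- pv_equiv track=rewrite | github.com/mikeyrichardson/mapreduce_jaccard_similarity | code/find_edit_distance_at_most_one.py | are_similar
-- ===== SOURCE A (Python) =====
-- def are_similar(sentence1, sentence2):
--     """
--     Return true if two sentences have edit distance
--     at most 1.
--     """
--     sentence1 = sentence1.split()
--     sentence2 = sentence2.split()
--     len1 = len(sentence1)
--     len2 = len(sentence2)
--     if (abs(len1 - len2) > 1):
--         return False
--     min_len = min(len1, len2)
--     max_len = max(len1, len2)
--     i = 0
--     while i < min_len:
--         if sentence1[i] != sentence2[i]:
--             break
--         i += 1
--     if i == min_len: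
--         return True
--     j = 1
--     while j <= min_len:
--         if sentence1[-j] != sentence2[-j]:
--             break
--         j += 1
--     if i + j == max_len:
--         return True
--     else:
--         return False
-- ===== SOURCE B (Python) =====
-- def _walk(w1, w2):
--     """Strip matching heads; at the first mismatch skip one word and compare tails."""
--     if not w1 or not w2:
--         return True
--     if w1[0] == w2[0]:
--         return _walk(w1[1:], w2[1:])
--     if len(w1) == len(w2):
--         return w1[1:] == w2[1:]
--     if len(w1) > len(w2):
--         return w1[1:] == w2
--     return w1 == w2[1:]
--
--
-- def are_similar(sentence1, sentence2):
--     w1 = sentence1.split()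
--     w2 = sentence2.split()
--     if abs(len(w1) - len(w2)) > 1:
--         return False
--     return _walk(w1, w2)
-- ===== Notes on version B (the rewrite author's own statement) =====
-- stated objective: simpler
-- what changed: Replaces A's two index-based while loops (forward scan plus a backward negative-index scan combined by an i+j==max_len arithmetic test) with a single recursive head-matching walk that, at the first mismatch, skips one word and compares the remaining tails directly.
-- intended difference: On sentence pairs whose word counts differ by exactly one and whose longest common suffix overlaps past the first mismatching word (the inserted word duplicates a neighbour, e.g. ('a a b','a b')), A returns False although the word-level edit distance is 1, while B returns True, which is the intended value per A's own docstring. — e.g. on are_similar("a a b", "a b"): A returns false, B returns true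
import Mathlib
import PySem

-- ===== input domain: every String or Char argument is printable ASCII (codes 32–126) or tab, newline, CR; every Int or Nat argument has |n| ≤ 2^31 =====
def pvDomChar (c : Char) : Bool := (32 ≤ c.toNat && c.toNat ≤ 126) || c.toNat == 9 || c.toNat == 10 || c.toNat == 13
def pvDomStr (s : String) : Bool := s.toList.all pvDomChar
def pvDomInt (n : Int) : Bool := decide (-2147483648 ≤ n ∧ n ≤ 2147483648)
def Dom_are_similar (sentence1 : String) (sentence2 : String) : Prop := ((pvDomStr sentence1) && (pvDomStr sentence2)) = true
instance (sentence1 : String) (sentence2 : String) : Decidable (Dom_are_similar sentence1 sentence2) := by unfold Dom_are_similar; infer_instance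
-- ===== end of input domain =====

-- B replaces A's forward and backward index loops and the i + j == max_len arithmetic test with
-- one recursive head-matching walk that skips one word at the first mismatch (objective: simpler).

-- ===== PORT A =====
-- while i < min_len: if sentence1[i] != sentence2[i]: break; i += 1
-- (fuel = minLen only makes the recursion structural; it is never exhausted before the loop exits)
def pvPrefLoop (w1 w2 : List String) (minLen i fuel : Nat) : Nat :=
  match fuel with
  | 0 => i
  | f + 1 =>
    if i < minLen then
      if PySem.List.pyGet? w1 (i : Int) ≠ PySem.List.pyGet? w2 (i : Int) then i
      else pvPrefLoop w1 w2 minLen (i + 1) f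
    else i

-- while j <= min_len: if sentence1[-j] != sentence2[-j]: break; j += 1
def pvSufLoop (w1 w2 : List String) (minLen j fuel : Nat) : Nat :=
  match fuel with
  | 0 => j
  | f + 1 =>
    if j ≤ minLen then
      if PySem.List.pyGet? w1 (-(j : Int)) ≠ PySem.List.pyGet? w2 (-(j : Int)) then j
      else pvSufLoop w1 w2 minLen (j + 1) f
    else j

def are_similar (sentence1 : String) (sentence2 : String) : Bool :=
  let w1 := PySem.Str.split₀ sentence1
  let w2 := PySem.Str.split₀ sentence2
  let len1 := w1.length
  let len2 := w2.length
  if ((len1 : Int) - (len2 : Int)).natAbs > 1 then false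
  else
    let minLen := min len1 len2
    let maxLen := max len1 len2
    let i := pvPrefLoop w1 w2 minLen 0 minLen
    if i = minLen then true
    else
      let j := pvSufLoop w1 w2 minLen 1 minLen
      if i + j = maxLen then true else false

-- ===== PORT B =====
-- _walk: strip matching heads; at the first mismatch skip one word and compare the tails
def pvWalk : List String → List String → Bool
  | [], _ => true
  | _ :: _, [] => true
  | x :: xs, y :: ys =>
    if x = y then pvWalk xs ys
    else if (x :: xs).length = (y :: ys).length then xs == ys
    else if (x :: xs).length > (y :: ys).length then xs == (y :: ys)
    else (x :: xs) == ys

def are_similar_alt (sentence1 : String) (sentence2 : String) : Bool :=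
  let w1 := PySem.Str.split₀ sentence1
  let w2 := PySem.Str.split₀ sentence2
  if ((w1.length : Int) - (w2.length : Int)).natAbs > 1 then false
  else pvWalk w1 w2

-- ===== PRECONDITION & SPEC =====
-- On sentence pairs whose word counts differ by exactly one and whose longest common word suffix
-- overlaps past the first mismatching word (the inserted word duplicates a neighbour, e.g.
-- ("a a b", "a b")), A returns False although the word-level edit distance is 1; B returns True,
-- the intended value per A's own docstring.  (p/s = longest common prefix/suffix word count.)
def D_are_similar (sentence1 : String) (sentence2 : String) : Prop :=
  let c := fun (a b : List String) => ((a.zip b).takeWhile fun q => q.1 == q.2).length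
  let w1 := PySem.Str.split₀ sentence1
  let w2 := PySem.Str.split₀ sentence2
  let m := min w1.length w2.length
  max w1.length w2.length = m + 1 ∧ c w1 w2 < m ∧ m < c w1 w2 + c w1.reverse w2.reverse

instance (sentence1 : String) (sentence2 : String) : Decidable (D_are_similar sentence1 sentence2) := by
  unfold D_are_similar; infer_instance

def Spec_are_similar (sentence1 : String) (sentence2 : String) (out : Bool) : Prop :=
  ¬ D_are_similar sentence1 sentence2 → out = are_similar_alt sentence1 sentence2

instance (sentence1 : String) (sentence2 : String) (out : Bool) : Decidable (Spec_are_similar sentence1 sentence2 out) := by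
  unfold Spec_are_similar; infer_instance

def pvDiffWitness_are_similar : String × String := ("a a b", "a b")
def pvDiffWitnessOut_are_similar : Bool × Bool := (false, true)

-- ===== CLAIM (what is proved, stated in full; the proofs are below) =====
def Claim_unchanged_are_similar : Prop := ∀ (sentence1 : String) (sentence2 : String), Dom_are_similar sentence1 sentence2 → Spec_are_similar sentence1 sentence2 (are_similar sentence1 sentence2)
def Claim_changed_are_similar : Prop := Dom_are_similar (pvDiffWitness_are_similar.1) (pvDiffWitness_are_similar.2) ∧ D_are_similar (pvDiffWitness_are_similar.1) (pvDiffWitness_are_similar.2) ∧ are_similar (pvDiffWitness_are_similar.1) (pvDiffWitness_are_similar.2) = pvDiffWitnessOut_are_similar.1 ∧ are_similar_alt (pvDiffWitness_are_similar.1) (pvDiffWitness_are_similar.2) = pvDiffWitnessOut_are_similar.2 ∧ pvDiffWitnessOut_are_similar.1 ≠ pvDiffWitnessOut_are_similar.2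
def Claim_exact_are_similar : Prop := ∀ (sentence1 : String) (sentence2 : String), Dom_are_similar sentence1 sentence2 → D_are_similar sentence1 sentence2 → are_similar sentence1 sentence2 ≠ are_similar_alt sentence1 sentence2

-- ===== LEMMAS AND PROOFS =====
-- proof-side abbreviations for the common prefix/suffix measures D_are_similar inlines
def pvCP (w1 w2 : List String) : Nat :=
  ((w1.zip w2).takeWhile fun q => q.1 == q.2).length

def pvCS (w1 w2 : List String) : Nat := pvCP w1.reverse w2.reverse

theorem pvCP_nil_left (w : List String) : pvCP [] w = 0 := by simp [pvCP]

theorem pvCP_nil_right' (w : List String) : pvCP w [] = 0 := by simp [pvCP]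

theorem pvCP_cons (x y : String) (xs ys : List String) :
    pvCP (x :: xs) (y :: ys) = if x = y then pvCP xs ys + 1 else 0 := by
  by_cases hxy : x = y <;> simp [pvCP, hxy]

theorem pvCP_le_min (w1 w2 : List String) : pvCP w1 w2 ≤ min w1.length w2.length := by
  induction w1 generalizing w2 with
  | nil => simp [pvCP_nil_left]
  | cons x xs ih =>
    cases w2 with
    | nil => simp [pvCP_nil_right']
    | cons y ys =>
      simp only [pvCP_cons, List.length_cons, Nat.succ_min_succ]
      split
      · exact Nat.succ_le_succ (ih ys)
      · omega

theorem pvCP_take_iff (w1 w2 : List String) (k : Nat) (h1 : k ≤ w1.length) (h2 : k ≤ w2.length) :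
    k ≤ pvCP w1 w2 ↔ w1.take k = w2.take k := by
  induction w1 generalizing w2 k with
  | nil =>
    simp at h1; subst h1; simp
  | cons x xs ih =>
    cases w2 with
    | nil => simp at h2; subst h2; simp
    | cons y ys =>
      cases k with
      | zero => simp
      | succ k =>
        simp only [pvCP_cons, List.take_succ_cons, List.cons.injEq]
        split
        · next hxy =>
          subst hxy
          rw [Nat.succ_le_succ_iff, ih ys k (by simpa using h1) (by simpa using h2)]
          tauto
        · next hxy => simp [hxy]

theorem pvCP_ne (w1 w2 : List String) (h : pvCP w1 w2 < min w1.length w2.length) :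
    w1[pvCP w1 w2]? ≠ w2[pvCP w1 w2]? := by
  induction w1 generalizing w2 with
  | nil => simp [pvCP_nil_left] at h
  | cons x xs ih =>
    cases w2 with
    | nil => simp [pvCP_nil_right'] at h
    | cons y ys =>
      by_cases hxy : x = y
      · have h' : pvCP (x :: xs) (y :: ys) = pvCP xs ys + 1 := by simp [pvCP_cons, hxy]
        rw [h'] at h ⊢
        simp only [List.getElem?_cons_succ]
        exact ih ys (by simp [List.length_cons, Nat.succ_min_succ] at h ⊢; omega)
      · have h' : pvCP (x :: xs) (y :: ys) = 0 := by simp [pvCP_cons, hxy]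
        rw [h']
        simpa using hxy

theorem pvCS_drop_iff (w1 w2 : List String) (k : Nat) (h1 : k ≤ w1.length) (h2 : k ≤ w2.length) :
    k ≤ pvCS w1 w2 ↔ w1.drop (w1.length - k) = w2.drop (w2.length - k) := by
  unfold pvCS
  rw [pvCP_take_iff _ _ k (by simpa using h1) (by simpa using h2)]
  rw [List.take_reverse, List.take_reverse]
  constructor
  · intro h
    have := congrArg List.reverse h
    simpa using this
  · intro h; rw [h]

theorem pvCP_drop_min (w1 w2 : List String) :
    pvCP (w1.drop (min w1.length w2.length)) (w2.drop (min w1.length w2.length)) = 0 := by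
  rcases Nat.le_total w1.length w2.length with h | h
  · rw [min_eq_left h, List.drop_length, pvCP_nil_left]
  · rw [min_eq_right h, List.drop_length, pvCP_nil_right']

theorem pvPrefLoop_eq (w1 w2 : List String) (fuel i : Nat)
    (h : i ≤ min w1.length w2.length) (hf : min w1.length w2.length - i ≤ fuel) :
    pvPrefLoop w1 w2 (min w1.length w2.length) i fuel
      = i + pvCP (w1.drop i) (w2.drop i) := by
  induction fuel generalizing i with
  | zero =>
    have hi : i = min w1.length w2.length := by omega
    subst hi
    simp [pvPrefLoop, pvCP_drop_min]
  | succ f ih =>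
    by_cases hlt : i < min w1.length w2.length
    · have hi1 : i < w1.length := by omega
      have hi2 : i < w2.length := by omega
      have g1 : PySem.List.pyGet? w1 (i : Int) = some w1[i] := by
        rw [PySem.List.pyGet?_natCast]; simp [hi1]
      have g2 : PySem.List.pyGet? w2 (i : Int) = some w2[i] := by
        rw [PySem.List.pyGet?_natCast]; simp [hi2]
      have d1 : w1.drop i = w1[i] :: w1.drop (i + 1) := List.drop_eq_getElem_cons hi1
      have d2 : w2.drop i = w2[i] :: w2.drop (i + 1) := List.drop_eq_getElem_cons hi2
      simp only [pvPrefLoop, if_pos hlt, g1, g2, d1, d2, pvCP_cons]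
      by_cases heq : w1[i] = w2[i]
      · rw [if_neg (not_not_intro (congrArg some heq)), if_pos heq,
          ih (i + 1) (by omega) (by omega)]
        omega
      · rw [if_pos (fun hc => heq (Option.some.inj hc)), if_neg heq]
        omega
    · have hi : i = min w1.length w2.length := by omega
      subst hi
      simp [pvPrefLoop, pvCP_drop_min]

theorem pvSufLoop_eq (w1 w2 : List String) (fuel t : Nat)
    (h : t ≤ min w1.length w2.length) (hf : min w1.length w2.length - t ≤ fuel) :
    pvSufLoop w1 w2 (min w1.length w2.length) (t + 1) fuel
      = (t + 1) + pvCP (w1.reverse.drop t) (w2.reverse.drop t) := by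
  induction fuel generalizing t with
  | zero =>
    have ht : t = min w1.length w2.length := by omega
    subst ht
    have : pvCP (w1.reverse.drop (min w1.length w2.length))
        (w2.reverse.drop (min w1.length w2.length)) = 0 := by
      have := pvCP_drop_min w1.reverse w2.reverse
      simpa using this
    simp [pvSufLoop, this]
  | succ f ih =>
    by_cases hlt : t + 1 ≤ min w1.length w2.length
    · have hi1 : t < w1.length := by omega
      have hi2 : t < w2.length := by omega
      have hr1 : t < w1.reverse.length := by simpa using hi1
      have hr2 : t < w2.reverse.length := by simpa using hi2
      have g1 : PySem.List.pyGet? w1 (-(((t + 1 : Nat)) : Int)) = some (w1.reverse[t]'hr1) := by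
        rw [PySem.List.pyGet?_neg_natCast w1 (t + 1) (by omega) (by omega)]
        rw [show w1.length - (t + 1) = w1.length - 1 - t from by omega]
        rw [← List.getElem?_reverse hi1]
        exact List.getElem?_eq_getElem hr1
      have g2 : PySem.List.pyGet? w2 (-(((t + 1 : Nat)) : Int)) = some (w2.reverse[t]'hr2) := by
        rw [PySem.List.pyGet?_neg_natCast w2 (t + 1) (by omega) (by omega)]
        rw [show w2.length - (t + 1) = w2.length - 1 - t from by omega]
        rw [← List.getElem?_reverse hi2]
        exact List.getElem?_eq_getElem hr2
      have d1 : w1.reverse.drop t = w1.reverse[t]'hr1 :: w1.reverse.drop (t + 1) :=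
        List.drop_eq_getElem_cons hr1
      have d2 : w2.reverse.drop t = w2.reverse[t]'hr2 :: w2.reverse.drop (t + 1) :=
        List.drop_eq_getElem_cons hr2
      simp only [pvSufLoop, if_pos hlt, g1, g2, d1, d2, pvCP_cons]
      by_cases heq : w1.reverse[t]'hr1 = w2.reverse[t]'hr2
      · rw [if_neg (not_not_intro (congrArg some heq)), if_pos heq,
          ih (t + 1) (by omega) (by omega)]
        omega
      · rw [if_pos (fun hc => heq (Option.some.inj hc)), if_neg heq]
    · have ht : t = min w1.length w2.length := by omega
      subst ht
      have hz : pvCP (w1.reverse.drop (min w1.length w2.length))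
          (w2.reverse.drop (min w1.length w2.length)) = 0 := by
        have := pvCP_drop_min w1.reverse w2.reverse
        simpa using this
      simp [pvSufLoop, hlt, hz]

theorem pvWalk_iff (w1 w2 : List String) :
    pvWalk w1 w2 = true ↔
      (pvCP w1 w2 = min w1.length w2.length ∨
        (pvCP w1 w2 < min w1.length w2.length ∧
          ((w1.length = w2.length ∧ w1.drop (pvCP w1 w2 + 1) = w2.drop (pvCP w1 w2 + 1)) ∨
           (w1.length > w2.length ∧ w1.drop (pvCP w1 w2 + 1) = w2.drop (pvCP w1 w2)) ∨
           (w1.length < w2.length ∧ w1.drop (pvCP w1 w2) = w2.drop (pvCP w1 w2 + 1))))) := by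
  induction w1 generalizing w2 with
  | nil => simp [pvWalk, pvCP_nil_left]
  | cons x xs ih =>
    cases w2 with
    | nil => simp [pvWalk, pvCP_nil_right']
    | cons y ys =>
      by_cases hxy : x = y
      · subst hxy
        have hcp : pvCP (x :: xs) (x :: ys) = pvCP xs ys + 1 := by simp [pvCP_cons]
        simp only [pvWalk, hcp, List.length_cons, Nat.succ_min_succ, Nat.succ_eq_add_one,
          List.drop_succ_cons, add_left_inj, add_lt_add_iff_right, gt_iff_lt, if_true]
        rw [ih ys]
      · have hcp : pvCP (x :: xs) (y :: ys) = 0 := by simp [pvCP_cons, hxy]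
        simp only [pvWalk, if_neg hxy, hcp, List.length_cons, Nat.succ_min_succ,
          Nat.succ_eq_add_one, Nat.zero_add, List.drop_succ_cons, List.drop_zero,
          gt_iff_lt, add_left_inj, add_lt_add_iff_right]
        split_ifs with h1 h2
        · simp only [beq_iff_eq]
          constructor
          · intro h; exact Or.inr ⟨by omega, Or.inl ⟨h1, h⟩⟩
          · rintro (h | ⟨-, (⟨-, h⟩ | ⟨h, -⟩ | ⟨h, -⟩)⟩)
            · exact h.elim
            · exact h
            · omega
            · omega
        · simp only [beq_iff_eq]
          constructor
          · intro h; exact Or.inr ⟨by omega, Or.inr (Or.inl ⟨by omega, h⟩)⟩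
          · rintro (h | ⟨-, (⟨h, -⟩ | ⟨-, h⟩ | ⟨h, -⟩)⟩)
            · exact h.elim
            · omega
            · exact h
            · omega
        · simp only [beq_iff_eq]
          constructor
          · intro h; exact Or.inr ⟨by omega, Or.inr (Or.inr ⟨by omega, h⟩)⟩
          · rintro (h | ⟨-, (⟨h, -⟩ | ⟨h, -⟩ | ⟨-, h⟩)⟩)
            · exact h.elim
            · omega
            · omega
            · exact h

theorem pvCS_bound_eqlen (w1 w2 : List String) (hl : w1.length = w2.length)
    (hp : pvCP w1 w2 < min w1.length w2.length) :
    pvCP w1 w2 + pvCS w1 w2 + 1 ≤ w1.length := by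
  by_contra hc
  have hple := pvCP_le_min w1 w2
  have hk : w1.length - pvCP w1 w2 ≤ pvCS w1 w2 := by omega
  have hdrop := (pvCS_drop_iff w1 w2 (w1.length - pvCP w1 w2) (by omega) (by omega)).mp hk
  rw [show w1.length - (w1.length - pvCP w1 w2) = pvCP w1 w2 from by omega,
      show w2.length - (w1.length - pvCP w1 w2) = pvCP w1 w2 from by omega] at hdrop
  apply pvCP_ne w1 w2 hp
  have h0 : (w1.drop (pvCP w1 w2))[0]? = (w2.drop (pvCP w1 w2))[0]? := by rw [hdrop]
  simpa [List.getElem?_drop] using h0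

theorem pvMain (w1 w2 : List String)
    (hD : ¬ (max w1.length w2.length = min w1.length w2.length + 1 ∧
        pvCP w1 w2 < min w1.length w2.length ∧
        min w1.length w2.length < pvCP w1 w2 + pvCS w1 w2)) :
    (if (((w1.length : Int) - (w2.length : Int)).natAbs > 1) then false
     else
       if pvPrefLoop w1 w2 (min w1.length w2.length) 0 (min w1.length w2.length)
            = min w1.length w2.length then true
       else
         if pvPrefLoop w1 w2 (min w1.length w2.length) 0 (min w1.length w2.length)
              + pvSufLoop w1 w2 (min w1.length w2.length) 1 (min w1.length w2.length)
            = max w1.length w2.length then true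
         else false)
    = (if (((w1.length : Int) - (w2.length : Int)).natAbs > 1) then false
       else pvWalk w1 w2) := by
  by_cases hgt : (((w1.length : Int) - (w2.length : Int)).natAbs > 1)
  · rw [if_pos hgt, if_pos hgt]
  · rw [if_neg hgt, if_neg hgt]
    have hp0 : pvPrefLoop w1 w2 (min w1.length w2.length) 0 (min w1.length w2.length)
        = pvCP w1 w2 := by
      have := pvPrefLoop_eq w1 w2 (min w1.length w2.length) 0 (by omega) (by omega)
      simpa using this
    have hs1 : pvSufLoop w1 w2 (min w1.length w2.length) 1 (min w1.length w2.length)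
        = 1 + pvCS w1 w2 := by
      have := pvSufLoop_eq w1 w2 (min w1.length w2.length) 0 (by omega) (by omega)
      simpa [pvCS] using this
    rw [hp0, hs1]
    have hple := pvCP_le_min w1 w2
    rw [Bool.eq_iff_iff, pvWalk_iff]
    by_cases hpm : pvCP w1 w2 = min w1.length w2.length
    · rw [if_pos hpm]
      exact iff_of_true rfl (Or.inl hpm)
    · rw [if_neg hpm]
      have hplt : pvCP w1 w2 < min w1.length w2.length := by omega
      by_cases hsum : pvCP w1 w2 + (1 + pvCS w1 w2) = max w1.length w2.length
      · rw [if_pos hsum]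
        refine iff_of_true rfl (Or.inr ⟨hplt, ?_⟩)
        rcases show w1.length = w2.length ∨ w1.length = w2.length + 1 ∨
            w2.length = w1.length + 1 from by omega with hl | hl | hl
        · refine Or.inl ⟨hl, ?_⟩
          have hk : w1.length - (pvCP w1 w2 + 1) ≤ pvCS w1 w2 := by omega
          have hdrop := (pvCS_drop_iff w1 w2 (w1.length - (pvCP w1 w2 + 1))
            (by omega) (by omega)).mp hk
          rw [show w1.length - (w1.length - (pvCP w1 w2 + 1)) = pvCP w1 w2 + 1 from by omega,
              show w2.length - (w1.length - (pvCP w1 w2 + 1)) = pvCP w1 w2 + 1 from by omega]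
            at hdrop
          exact hdrop
        · refine Or.inr (Or.inl ⟨by omega, ?_⟩)
          have hk : w2.length - pvCP w1 w2 ≤ pvCS w1 w2 := by omega
          have hdrop := (pvCS_drop_iff w1 w2 (w2.length - pvCP w1 w2)
            (by omega) (by omega)).mp hk
          rw [show w1.length - (w2.length - pvCP w1 w2) = pvCP w1 w2 + 1 from by omega,
              show w2.length - (w2.length - pvCP w1 w2) = pvCP w1 w2 from by omega] at hdrop
          exact hdrop
        · refine Or.inr (Or.inr ⟨by omega, ?_⟩)
          have hk : w1.length - pvCP w1 w2 ≤ pvCS w1 w2 := by omega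
          have hdrop := (pvCS_drop_iff w1 w2 (w1.length - pvCP w1 w2)
            (by omega) (by omega)).mp hk
          rw [show w1.length - (w1.length - pvCP w1 w2) = pvCP w1 w2 from by omega,
              show w2.length - (w1.length - pvCP w1 w2) = pvCP w1 w2 + 1 from by omega] at hdrop
          exact hdrop
      · rw [if_neg hsum]
        refine iff_of_false (by simp) ?_
        rintro (h | ⟨-, (⟨hl, hE⟩ | ⟨hl, hE⟩ | ⟨hl, hE⟩)⟩)
        · exact hpm h
        · -- equal lengths
          have hb := pvCS_bound_eqlen w1 w2 hl hplt
          have hk := (pvCS_drop_iff w1 w2 (w1.length - (pvCP w1 w2 + 1))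
            (by omega) (by omega)).mpr (by
              rw [show w1.length - (w1.length - (pvCP w1 w2 + 1)) = pvCP w1 w2 + 1 from by omega,
                  show w2.length - (w1.length - (pvCP w1 w2 + 1)) = pvCP w1 w2 + 1 from by omega]
              exact hE)
          exact hsum (by omega)
        · -- w1 longer
          have hk := (pvCS_drop_iff w1 w2 (w2.length - pvCP w1 w2)
            (by omega) (by omega)).mpr (by
              rw [show w1.length - (w2.length - pvCP w1 w2) = pvCP w1 w2 + 1 from by omega,
                  show w2.length - (w2.length - pvCP w1 w2) = pvCP w1 w2 from by omega]
              exact hE)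
          have hnd : pvCP w1 w2 + pvCS w1 w2 ≤ min w1.length w2.length := by
            by_contra hc
            exact hD ⟨by omega, hplt, by omega⟩
          exact hsum (by omega)
        · -- w2 longer
          have hk := (pvCS_drop_iff w1 w2 (w1.length - pvCP w1 w2)
            (by omega) (by omega)).mpr (by
              rw [show w1.length - (w1.length - pvCP w1 w2) = pvCP w1 w2 from by omega,
                  show w2.length - (w1.length - pvCP w1 w2) = pvCP w1 w2 + 1 from by omega]
              exact hE)
          have hnd : pvCP w1 w2 + pvCS w1 w2 ≤ min w1.length w2.length := by
            by_contra hc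
            exact hD ⟨by omega, hplt, by omega⟩
          exact hsum (by omega)

theorem pvTight (w1 w2 : List String)
    (h1 : max w1.length w2.length = min w1.length w2.length + 1)
    (h2 : pvCP w1 w2 < min w1.length w2.length)
    (h3 : min w1.length w2.length < pvCP w1 w2 + pvCS w1 w2) :
    (if (((w1.length : Int) - (w2.length : Int)).natAbs > 1) then false
     else
       if pvPrefLoop w1 w2 (min w1.length w2.length) 0 (min w1.length w2.length)
            = min w1.length w2.length then true
       else
         if pvPrefLoop w1 w2 (min w1.length w2.length) 0 (min w1.length w2.length)
              + pvSufLoop w1 w2 (min w1.length w2.length) 1 (min w1.length w2.length)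
            = max w1.length w2.length then true
         else false) = false
    ∧ pvWalk w1 w2 = true := by
  have hp0 : pvPrefLoop w1 w2 (min w1.length w2.length) 0 (min w1.length w2.length)
      = pvCP w1 w2 := by
    have := pvPrefLoop_eq w1 w2 (min w1.length w2.length) 0 (by omega) (by omega)
    simpa using this
  have hs1 : pvSufLoop w1 w2 (min w1.length w2.length) 1 (min w1.length w2.length)
      = 1 + pvCS w1 w2 := by
    have := pvSufLoop_eq w1 w2 (min w1.length w2.length) 0 (by omega) (by omega)
    simpa [pvCS] using this
  constructor
  · rw [if_neg (by omega), hp0, hs1, if_neg (by omega), if_neg (by omega)]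
  · rw [pvWalk_iff]
    refine Or.inr ⟨h2, ?_⟩
    rcases show w1.length = w2.length + 1 ∨ w2.length = w1.length + 1 from by omega
      with hl | hl
    · refine Or.inr (Or.inl ⟨by omega, ?_⟩)
      have hk : w2.length - pvCP w1 w2 ≤ pvCS w1 w2 := by omega
      have hdrop := (pvCS_drop_iff w1 w2 (w2.length - pvCP w1 w2)
        (by omega) (by omega)).mp hk
      rw [show w1.length - (w2.length - pvCP w1 w2) = pvCP w1 w2 + 1 from by omega,
          show w2.length - (w2.length - pvCP w1 w2) = pvCP w1 w2 from by omega] at hdrop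
      exact hdrop
    · refine Or.inr (Or.inr ⟨by omega, ?_⟩)
      have hk : w1.length - pvCP w1 w2 ≤ pvCS w1 w2 := by omega
      have hdrop := (pvCS_drop_iff w1 w2 (w1.length - pvCP w1 w2)
        (by omega) (by omega)).mp hk
      rw [show w1.length - (w1.length - pvCP w1 w2) = pvCP w1 w2 from by omega,
          show w2.length - (w1.length - pvCP w1 w2) = pvCP w1 w2 + 1 from by omega] at hdrop
      exact hdrop

-- ===== VERDICT (by name: the statement is the Claim_ definition above) =====
theorem are_similar_spec : Claim_unchanged_are_similar := by
  intro sentence1 sentence2 _ hD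
  show are_similar sentence1 sentence2 = are_similar_alt sentence1 sentence2
  exact pvMain (PySem.Str.split₀ sentence1) (PySem.Str.split₀ sentence2) hD

theorem are_similar_changed : Claim_changed_are_similar := by
  unfold Claim_changed_are_similar; decide

theorem are_similar_tight : Claim_exact_are_similar := by
  intro sentence1 sentence2 _ hD
  obtain ⟨h1, h2, h3⟩ := hD
  have ht := pvTight (PySem.Str.split₀ sentence1) (PySem.Str.split₀ sentence2) h1 h2 h3
  have hA : are_similar sentence1 sentence2 = false := ht.1
  have hB : are_similar_alt sentence1 sentence2 = true := by
    show (if (((PySem.Str.split₀ sentence1).length : Int)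
            - ((PySem.Str.split₀ sentence2).length : Int)).natAbs > 1 then false
          else pvWalk (PySem.Str.split₀ sentence1) (PySem.Str.split₀ sentence2)) = true
    rw [if_neg (by omega)]
    exact ht.2
  simp [hA, hB]
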